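-- pv_equiv track=rewrite | github.com/Nikolay28042022/PythonHomeworks | Homework3/Task2.py | MultPair
-- ===== SOURCE A (Python) =====
-- def MultPair(list_a):
--     """Произведение пар чисел списка."""
--     list_b = list_a[::-1]   # list_b = list(reversed(list_a)) -> второй способ
--     list_c = []
--     if len(list_a) % 2 != 0:
--         for i in range(len(list_a) // 2 + 1):
--             for j in range(len(list_b) // 2 + 1):
--                 if i == j:
--                     list_c.append(list_a[i] * list_b[j])
--     else:
--         for i in range(len(list_a) // 2):
--             for j in range(len(list_b) // 2):
--                 if i == j:
--                     list_c.append(list_a[i] * list_b[j])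
--     return list_c
-- ===== SOURCE B (Python) =====
-- def MultPair(list_a):
--     """Произведение пар чисел списка."""
--     result = []
--     left, right = 0, len(list_a) - 1
--     while left <= right:
--         result.append(list_a[left] * list_a[right])
--         left += 1
--         right -= 1
--     return result
-- ===== Notes on version B (the rewrite author's own statement) =====
-- stated objective: faster
-- what changed: Two converging pointers over the original list replace the reversed copy plus the quadratic nested i==j double loop.
import Mathlib
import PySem

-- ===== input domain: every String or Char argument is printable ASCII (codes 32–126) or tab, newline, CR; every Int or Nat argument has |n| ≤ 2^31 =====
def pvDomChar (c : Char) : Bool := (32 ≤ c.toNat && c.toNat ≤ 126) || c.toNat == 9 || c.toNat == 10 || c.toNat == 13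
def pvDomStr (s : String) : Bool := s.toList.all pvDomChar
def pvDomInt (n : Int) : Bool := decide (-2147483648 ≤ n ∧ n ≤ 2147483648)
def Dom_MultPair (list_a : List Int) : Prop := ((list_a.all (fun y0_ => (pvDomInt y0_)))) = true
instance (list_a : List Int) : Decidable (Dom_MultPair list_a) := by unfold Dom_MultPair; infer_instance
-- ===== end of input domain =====

-- B replaces A's reversed copy and quadratic nested i==j scan by a linear two-pointer loop.

-- ===== PORT A =====
def MultPair (list_a : List Int) : List Int :=
  -- list_b = list_a[::-1]  (slice?_none_none_neg_one: exactly reverse)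
  let list_b := list_a.reverse
  if (list_a.length : Int) % 2 ≠ 0 then
    (PySem.List.pyRange 0 (PySem.Int.floordiv (list_a.length : Int) 2 + 1) 1).foldl
      (fun list_c i =>
        (PySem.List.pyRange 0 (PySem.Int.floordiv (list_b.length : Int) 2 + 1) 1).foldl
          (fun list_c j =>
            if i = j then
              list_c ++ [PySem.List.pyGetD list_a i 0 * PySem.List.pyGetD list_b j 0]
            else list_c) list_c) []
  else
    (PySem.List.pyRange 0 (PySem.Int.floordiv (list_a.length : Int) 2) 1).foldl
      (fun list_c i =>
        (PySem.List.pyRange 0 (PySem.Int.floordiv (list_b.length : Int) 2) 1).foldl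
          (fun list_c j =>
            if i = j then
              list_c ++ [PySem.List.pyGetD list_a i 0 * PySem.List.pyGetD list_b j 0]
            else list_c) list_c) []

-- ===== PORT B =====
-- while left <= right: append xs[left]*xs[right]; left += 1; right -= 1
def MultPairGo (xs : List Int) (left right : Int) : List Int :=
  if left ≤ right then
    PySem.List.pyGetD xs left 0 * PySem.List.pyGetD xs right 0 ::
      MultPairGo xs (left + 1) (right - 1)
  else []
termination_by (right + 1 - left).toNat
decreasing_by omega

def MultPair_alt (list_a : List Int) : List Int :=
  MultPairGo list_a 0 ((list_a.length : Int) - 1)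

-- ===== PRECONDITION & SPEC =====
def Spec_MultPair (list_a : List Int) (out : List Int) : Prop := out = MultPair_alt list_a
instance (list_a : List Int) (out : List Int) : Decidable (Spec_MultPair list_a out) := by unfold Spec_MultPair; infer_instance

-- ===== CLAIM (what is proved, stated in full; the proofs are below) =====
def Claim_equal_MultPair : Prop := ∀ (list_a : List Int), Dom_MultPair list_a → Spec_MultPair list_a (MultPair list_a)

-- ===== LEMMAS AND PROOFS =====


-- the inner j-loop appends exactly one element, a[i]*b[i], when 0 ≤ i < m
lemma inner_loop_eq (a b : List Int) (m i : Int) (acc : List Int)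
    (h0 : 0 ≤ i) (h1 : i < m) :
    (PySem.List.pyRange 0 m 1).foldl
      (fun list_c j =>
        if i = j then
          list_c ++ [PySem.List.pyGetD a i 0 * PySem.List.pyGetD b j 0]
        else list_c) acc
    = acc ++ [PySem.List.pyGetD a i 0 * PySem.List.pyGetD b i 0] := by
  rw [PySem.List.foldl_append_ite (fun j => i = j)
    (fun j => PySem.List.pyGetD a i 0 * PySem.List.pyGetD b j 0)]
  have hmem : i ∈ PySem.List.pyRange 0 m 1 := by
    rw [PySem.List.mem_pyRange_one]; omega
  have hnd : (PySem.List.pyRange 0 m 1).Nodup := PySem.List.nodup_pyRange_one 0 m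
  have hfil : (PySem.List.pyRange 0 m 1).filter (fun j => decide (i = j)) = [i] := by
    have hcount : (PySem.List.pyRange 0 m 1).count i = 1 :=
      le_antisymm (List.nodup_iff_count_le_one.mp hnd i) (List.count_pos_iff.mpr hmem)
    have h2 : (PySem.List.pyRange 0 m 1).filter (fun j => j == i) = [i] := by
      rw [List.filter_beq (l := PySem.List.pyRange 0 m 1) (a := i), hcount]
      rfl
    calc (PySem.List.pyRange 0 m 1).filter (fun j => decide (i = j))
        = (PySem.List.pyRange 0 m 1).filter (fun j => j == i) := by
          apply List.filter_congr; intro x _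
          rcases eq_or_ne i x with h | h
          · subst h; simp
          · simp [h, h.symm]
      _ = [i] := h2
  rw [hfil]; rfl

-- the whole A-side double loop is a map over the half range
lemma outer_loop_eq (a b : List Int) (m : Int) :
    (PySem.List.pyRange 0 m 1).foldl
      (fun list_c i =>
        (PySem.List.pyRange 0 m 1).foldl
          (fun list_c j =>
            if i = j then
              list_c ++ [PySem.List.pyGetD a i 0 * PySem.List.pyGetD b j 0]
            else list_c) list_c) []
    = (PySem.List.pyRange 0 m 1).map
        (fun i => PySem.List.pyGetD a i 0 * PySem.List.pyGetD b i 0) := by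
  have hcong := PySem.List.foldl_congr_mem (l := PySem.List.pyRange 0 m 1)
    (init := ([] : List Int))
    (f := fun list_c i =>
      (PySem.List.pyRange 0 m 1).foldl
        (fun list_c j =>
          if i = j then
            list_c ++ [PySem.List.pyGetD a i 0 * PySem.List.pyGetD b j 0]
          else list_c) list_c)
    (g := fun list_c i =>
      list_c ++ [PySem.List.pyGetD a i 0 * PySem.List.pyGetD b i 0])
    (by
      intro acc x hx
      rw [PySem.List.mem_pyRange_one] at hx
      exact inner_loop_eq a b m x acc hx.1 hx.2)
  rw [hcong, PySem.List.foldl_append_singleton_eq_map, List.nil_append]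

-- B's loop in closed form: ceil((right-left+1)/2) products of converging indices
lemma go_eq (xs : List Int) : ∀ (fuel : Nat) (left right : Int),
    (right + 1 - left).toNat ≤ fuel →
    MultPairGo xs left right =
      (List.range (((right + 1 - left).toNat + 1) / 2)).map
        (fun (t : Nat) => PySem.List.pyGetD xs (left + (t : Int)) 0 * PySem.List.pyGetD xs (right - (t : Int)) 0) := by
  intro fuel
  induction fuel with
  | zero =>
    intro left right h
    have hlt : ¬ left ≤ right := by omega
    have hz : (right + 1 - left).toNat = 0 := by omega
    rw [MultPairGo, if_neg hlt, hz]
    rfl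
  | succ n ih =>
    intro left right h
    rw [MultPairGo]
    by_cases hle : left ≤ right
    · rw [if_pos hle, ih (left + 1) (right - 1) (by omega)]
      have hcnt : ((right + 1 - left).toNat + 1) / 2
          = ((right - 1 + 1 - (left + 1)).toNat + 1) / 2 + 1 := by omega
      rw [hcnt, List.range_succ_eq_map]
      simp only [List.map_cons, List.map_map]
      congr 1
      · norm_num
      · apply List.map_congr_left
        intro t _
        simp only [Function.comp]
        push_cast
        ring_nf
    · rw [if_neg hle]
      have hz : ((right + 1 - left).toNat + 1) / 2 = 0 := by omega
      rw [hz]; rfl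

-- getD on the reverse
lemma getD_reverse' (xs : List Int) (t : Nat) (ht : t < xs.length) :
    xs.reverse.getD t 0 = xs.getD (xs.length - 1 - t) 0 := by
  rw [List.getD_eq_getElem _ _ (by simpa using ht),
      List.getD_eq_getElem _ _ (by omega),
      List.getElem_reverse]

-- A's half-range map equals B's closed form, index by index
lemma key_map (list_a : List Int) (k : Nat) (hk : k ≤ (list_a.length + 1) / 2) :
    (PySem.List.pyRange 0 (k : Int) 1).map
      (fun i => PySem.List.pyGetD list_a i 0 * PySem.List.pyGetD list_a.reverse i 0)
    = (List.range k).map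
        (fun (t : Nat) => PySem.List.pyGetD list_a (0 + (t : Int)) 0 *
                  PySem.List.pyGetD list_a ((list_a.length : Int) - 1 - (t : Int)) 0) := by
  rw [PySem.List.pyRange_one]
  have hsub : ((k : Int) - 0).toNat = k := by omega
  rw [hsub, List.map_map]
  apply List.map_congr_left
  intro t ht
  rw [List.mem_range] at ht
  have htn : t < list_a.length := by omega
  simp only [Function.comp, zero_add]
  have h3 : ((list_a.length : Int) - 1 - (t : Int)) = ((list_a.length - 1 - t : Nat) : Int) := by
    omega
  rw [h3]
  simp only [PySem.List.pyGetD_natCast]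
  rw [getD_reverse' list_a t htn]

-- ===== VERDICT (by name: the statement is the Claim_ definition above) =====
theorem MultPair_spec : Claim_equal_MultPair := by
  intro list_a _
  unfold Spec_MultPair MultPair MultPair_alt
  dsimp only
  simp only [List.length_reverse]
  have hB : MultPairGo list_a 0 ((list_a.length : Int) - 1)
      = (List.range ((list_a.length + 1) / 2)).map
          (fun (t : Nat) => PySem.List.pyGetD list_a (0 + (t : Int)) 0 *
                    PySem.List.pyGetD list_a ((list_a.length : Int) - 1 - (t : Int)) 0) := by
    rw [go_eq list_a ((list_a.length : Int) - 1 + 1 - 0).toNat 0 ((list_a.length : Int) - 1)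
        (le_refl _)]
    have : (((list_a.length : Int) - 1 + 1 - 0).toNat + 1) / 2 = (list_a.length + 1) / 2 := by
      omega
    rw [this]
  rw [hB]
  by_cases hodd : ((list_a.length : Int)) % 2 ≠ 0
  · rw [if_pos hodd]
    have hdiv : PySem.Int.floordiv (list_a.length : Int) 2 + 1
        = (((list_a.length + 1) / 2 : Nat) : Int) := by
      rw [PySem.Int.floordiv, Int.fdiv_eq_ediv]
      simp only [show ((0:Int) ≤ 2 ∨ (2:Int) ∣ (list_a.length : Int)) from Or.inl (by omega), if_pos]
      omega
    rw [hdiv, outer_loop_eq]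
    exact key_map list_a _ (le_refl _)
  · rw [if_neg hodd]
    have hdiv : PySem.Int.floordiv (list_a.length : Int) 2
        = (((list_a.length + 1) / 2 : Nat) : Int) := by
      rw [PySem.Int.floordiv, Int.fdiv_eq_ediv]
      simp only [show ((0:Int) ≤ 2 ∨ (2:Int) ∣ (list_a.length : Int)) from Or.inl (by omega), if_pos]
      omega
    rw [hdiv, outer_loop_eq]
    exact key_map list_a _ (le_refl _)
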